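-- pv_equiv track=rewrite | github.com/rymarmary/compEGE | search_for_divisors(task_25)/25_17.py | countdel
-- ===== SOURCE A (Python) =====
-- def countdel(n):
--     d = 2
--     kdel = 0
--     while d * d < n:
--         if n % d == 0:
--             kdel += 2
--         d += 1
--     if d * d == n:
--         kdel += 1
--     return kdel
-- ===== SOURCE B (Python) =====
-- def countdel(n):
--     if n < 2:
--         return 0
--     cnt = 1
--     m = n
--     d = 2
--     while d * d <= m:
--         if m % d == 0:
--             e = 0
--             while m % d == 0:
--                 m //= d
--                 e += 1
--             cnt *= e + 1
--         d += 1
--     if m > 1: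
--         cnt *= 2
--     return cnt - 2
-- ===== Notes on version B (the rewrite author's own statement) =====
-- stated objective: alternative
-- what changed: B never enumerates divisors: it factors n into prime powers and computes the divisor count as the product of (exponent+1), then subtracts 2 for the divisors 1 and n, instead of A's scan that adds 2 per divisor pair below sqrt(n) plus a perfect-square bonus.
import Mathlib
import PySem

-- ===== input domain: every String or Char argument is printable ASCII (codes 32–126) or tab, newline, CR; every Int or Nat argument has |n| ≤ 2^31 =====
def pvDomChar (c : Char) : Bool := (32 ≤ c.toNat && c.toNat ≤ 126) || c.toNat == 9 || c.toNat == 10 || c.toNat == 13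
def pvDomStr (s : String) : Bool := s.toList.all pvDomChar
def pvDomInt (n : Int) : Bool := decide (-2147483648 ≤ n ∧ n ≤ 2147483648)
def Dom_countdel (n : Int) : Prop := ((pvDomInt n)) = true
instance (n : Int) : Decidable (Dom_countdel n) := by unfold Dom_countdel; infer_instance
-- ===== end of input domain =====

-- B never enumerates divisors: it factors n into prime powers and returns the product of
-- (exponent + 1) minus 2 (for the divisors 1 and n), instead of A's scan below sqrt(n)
-- that adds 2 per divisor pair plus a perfect-square bonus; an alternative algorithm.

-- termination helper for the port of A's while loop (cited in decreasing_by)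
lemma le_mul_self_int (d : Int) : d ≤ d * d := by
  rcases (by omega : 1 ≤ d ∨ d ≤ 0) with h | h
  · nlinarith
  · nlinarith [mul_self_nonneg d]

-- ===== PORT A =====
-- the while loop: state (d, kdel); on exit it performs A's trailing 'if d*d == n' check
def countdelLoop (n d kdel : Int) : Int :=
  if d * d < n then
    countdelLoop n (d + 1) (if PySem.Int.mod n d = 0 then kdel + 2 else kdel)
  else
    if d * d = n then kdel + 1 else kdel
termination_by (n - d).toNat
decreasing_by
  have h2 := le_mul_self_int d
  omega

def countdel (n : Int) : Int := countdelLoop n 2 0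

-- ===== PORT B =====
-- Source B's inner loop 'while m % d == 0: m //= d; e += 1', returning (e, final m);
-- the guards 2 ≤ d, 0 < m only make the recursion total (they hold on every reachable call)
def pyExtract (d m : Nat) : Nat × Nat :=
  if h : m % d = 0 ∧ 2 ≤ d ∧ 0 < m then
    let r := pyExtract d (m / d)
    (r.1 + 1, r.2)
  else (0, m)
termination_by m
decreasing_by exact Nat.div_lt_self h.2.2 (by omega)

-- termination helper for facLoop (cited in decreasing_by)
lemma pyExtract_snd_le (d : Nat) : ∀ m, (pyExtract d m).2 ≤ m := by
  intro m
  induction m using Nat.strong_induction_on with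
  | _ m ih =>
    rw [pyExtract]
    split
    · next h =>
      exact le_trans (ih (m / d) (Nat.div_lt_self h.2.2 (by omega))) (Nat.div_le_self m d)
    · exact le_refl m

-- Source B's outer loop: state (d, m, cnt); on exit it performs the trailing 'if m > 1' doubling
def facLoop (d m cnt : Nat) : Nat :=
  if d * d ≤ m then
    if m % d = 0 then
      facLoop (d + 1) (pyExtract d m).2 (cnt * ((pyExtract d m).1 + 1))
    else
      facLoop (d + 1) m cnt
  else
    if 1 < m then cnt * 2 else cnt
termination_by m + 2 - d
decreasing_by
  · have h1 := pyExtract_snd_le d m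
    have h2 : d ≤ d * d := by nlinarith
    omega
  · have h2 : d ≤ d * d := by nlinarith
    omega

def countdel_alt (n : Int) : Int :=
  if n < 2 then 0 else (facLoop 2 n.toNat 1 : Nat) - 2

-- ===== PRECONDITION & SPEC =====
def Spec_countdel (n : Int) (out : Int) : Prop := out = countdel_alt n
instance (n : Int) (out : Int) : Decidable (Spec_countdel n out) := by unfold Spec_countdel; infer_instance

-- ===== CLAIM (what is proved, stated in full; the proofs are below) =====
def Claim_equal_countdel : Prop := ∀ (n : Int), Dom_countdel n → Spec_countdel n (countdel n)

-- ===== LEMMAS AND PROOFS =====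

-- the small divisors of n not yet consumed by A's loop when the counter is at d
noncomputable def smallSet (n d : Int) : Finset Int :=
  (Finset.Ico d n).filter (fun e => e * e < n ∧ PySem.Int.mod n e = 0)

-- the divisors of n in [2, n) larger than its square root
noncomputable def bigSet (n : Int) : Finset Int :=
  (Finset.Ico 2 n).filter (fun e => n < e * e ∧ PySem.Int.mod n e = 0)

-- the square root of n, as a divisor in [2, n), if n is a perfect square
noncomputable def sqSet (n : Int) : Finset Int :=
  (Finset.Ico 2 n).filter (fun e => e * e = n)

-- 1 iff n has a square root ≥ d (A's trailing perfect-square bonus)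
noncomputable def sqTerm (n d : Int) : Int :=
  if ((Finset.Ico d (n + 1)).filter (fun e => e * e = n)).Nonempty then 1 else 0

lemma smallSet_step (n d : Int) (_h2 : 2 ≤ d) (hlt : d * d < n) :
    ((smallSet n d).card : Int) =
      (if PySem.Int.mod n d = 0 then 1 else 0) + (smallSet n (d + 1)).card := by
  have hdn : d < n := by have := le_mul_self_int d; omega
  unfold smallSet
  rw [← Finset.insert_Ico_add_one_left_eq_Ico hdn, Finset.filter_insert]
  by_cases hP : PySem.Int.mod n d = 0
  · rw [if_pos ⟨hlt, hP⟩, if_pos hP,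
      Finset.card_insert_of_notMem (by simp [Finset.mem_filter, Finset.mem_Ico])]
    push_cast; ring
  · rw [if_neg (by tauto), if_neg hP]
    simp

lemma sqTerm_step (n d : Int) (hlt : d * d < n) : sqTerm n d = sqTerm n (d + 1) := by
  unfold sqTerm
  have hset : (Finset.Ico d (n + 1)).filter (fun e => e * e = n)
      = (Finset.Ico (d + 1) (n + 1)).filter (fun e => e * e = n) := by
    ext e
    simp only [Finset.mem_filter, Finset.mem_Ico]
    constructor
    · rintro ⟨⟨h1, h2⟩, h3⟩
      refine ⟨⟨?_, h2⟩, h3⟩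
      rcases (by omega : d + 1 ≤ e ∨ e = d) with h | h
      · exact h
      · subst h; omega
    · rintro ⟨⟨h1, h2⟩, h3⟩
      exact ⟨⟨by omega, h2⟩, h3⟩
  rw [hset]

lemma smallSet_exit (n d : Int) (h2 : 2 ≤ d) (hge : ¬ d * d < n) : smallSet n d = ∅ := by
  unfold smallSet
  rw [Finset.filter_eq_empty_iff]
  intro e he
  rw [Finset.mem_Ico] at he
  rintro ⟨h1, -⟩
  nlinarith [mul_le_mul he.1 he.1 (by omega : (0:ℤ) ≤ d) (by omega : (0:ℤ) ≤ e)]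

lemma sqTerm_exit (n d : Int) (h2 : 2 ≤ d) (hge : ¬ d * d < n) :
    sqTerm n d = if d * d = n then 1 else 0 := by
  unfold sqTerm
  by_cases heq : d * d = n
  · rw [if_pos heq, if_pos]
    refine ⟨d, ?_⟩
    simp only [Finset.mem_filter, Finset.mem_Ico]
    have := le_mul_self_int d
    exact ⟨⟨le_refl d, by omega⟩, heq⟩
  · rw [if_neg heq, if_neg]
    rintro ⟨e, he⟩
    simp only [Finset.mem_filter, Finset.mem_Ico] at he
    obtain ⟨⟨h1, -⟩, h3⟩ := he
    have : d * d ≤ e * e :=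
      mul_le_mul h1 h1 (by omega : (0:ℤ) ≤ d) (by omega : (0:ℤ) ≤ e)
    exact heq (by omega)

-- A's loop, characterised: counter + twice the remaining small divisors + the square bonus
lemma loop_eq (n d kdel : Int) :
    2 ≤ d → countdelLoop n d kdel = kdel + 2 * (smallSet n d).card + sqTerm n d := by
  induction d, kdel using countdelLoop.induct n with
  | case1 d kdel hlt ih =>
    intro hd
    have ih' := ih (by omega)
    by_cases hP : PySem.Int.mod n d = 0
    · rw [dif_pos hP] at ih'
      rw [countdelLoop, if_pos hlt, if_pos hP, ih', smallSet_step n d hd hlt,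
          sqTerm_step n d hlt, if_pos hP]
      ring
    · rw [dif_neg hP] at ih'
      rw [countdelLoop, if_pos hlt, if_neg hP, ih', smallSet_step n d hd hlt,
          sqTerm_step n d hlt, if_neg hP]
      ring
  | case2 d kdel hge heq =>
    intro hd
    rw [countdelLoop, if_neg hge, if_pos heq, smallSet_exit n d hd hge,
        sqTerm_exit n d hd hge, if_pos heq]
    simp
  | case3 d kdel hge hne =>
    intro hd
    rw [countdelLoop, if_neg hge, if_neg hne, smallSet_exit n d hd hge,
        sqTerm_exit n d hd hge, if_neg hne]
    simp

-- pairing e ↦ n / e maps a divisor below the square root to one above it, and back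
lemma pair_small (n e : Int) (hn : 2 ≤ n) (he2 : 2 ≤ e) (hdvd : e ∣ n) (hlt : e * e < n) :
    2 ≤ n / e ∧ n / e < n ∧ n < (n / e) * (n / e) ∧ (n / e) ∣ n ∧ n / (n / e) = e := by
  obtain ⟨c, hc⟩ := hdvd
  have hne : e ≠ 0 := by omega
  have hq : n / e = c := by rw [hc, Int.mul_ediv_cancel_left _ hne]
  have hec : e < c := by nlinarith
  have hcn : c < n := by nlinarith
  have hnc : n < c * c := by nlinarith
  refine ⟨by omega, by omega, by rw [hq]; exact hnc, ?_, ?_⟩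
  · rw [hq]; exact ⟨e, by rw [hc]; ring⟩
  · rw [hq, hc, mul_comm, Int.mul_ediv_cancel_left _ (by omega : c ≠ 0)]

lemma pair_big (n e : Int) (hn : 2 ≤ n) (he2 : 2 ≤ e) (hen : e < n) (hdvd : e ∣ n)
    (hgt : n < e * e) :
    2 ≤ n / e ∧ n / e < n ∧ (n / e) * (n / e) < n ∧ (n / e) ∣ n ∧ n / (n / e) = e := by
  obtain ⟨c, hc⟩ := hdvd
  have hne : e ≠ 0 := by omega
  have hq : n / e = c := by rw [hc, Int.mul_ediv_cancel_left _ hne]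
  have hc1 : 1 ≤ c := by nlinarith
  have hce : c < e := by nlinarith
  have hc2 : 2 ≤ c := by
    rcases (by omega : c = 1 ∨ 2 ≤ c) with h | h
    · exfalso; rw [h, mul_one] at hc; omega
    · exact h
  have hcc : c * c < n := by nlinarith
  refine ⟨by omega, by omega, by rw [hq]; exact hcc, ?_, ?_⟩
  · rw [hq]; exact ⟨e, by rw [hc]; ring⟩
  · rw [hq, hc, mul_comm, Int.mul_ediv_cancel_left _ (by omega : c ≠ 0)]

lemma card_small_eq_big (n : Int) (hn : 2 ≤ n) : (smallSet n 2).card = (bigSet n).card := by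
  apply Finset.card_nbij' (fun e => n / e) (fun e => n / e)
  · intro e he
    unfold smallSet at he
    simp only [Finset.mem_coe, Finset.mem_filter, Finset.mem_Ico] at he
    obtain ⟨⟨he2, -⟩, hlt, hmod⟩ := he
    have hdvd := (PySem.Int.mod_eq_zero_iff_dvd n e).mp hmod
    obtain ⟨h1, h2, h3, h4, -⟩ := pair_small n e hn he2 hdvd hlt
    unfold bigSet
    simp only [Finset.mem_coe, Finset.mem_filter, Finset.mem_Ico]
    exact ⟨⟨h1, h2⟩, h3, (PySem.Int.mod_eq_zero_iff_dvd n _).mpr h4⟩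
  · intro e he
    unfold bigSet at he
    simp only [Finset.mem_coe, Finset.mem_filter, Finset.mem_Ico] at he
    obtain ⟨⟨he2, hen⟩, hgt, hmod⟩ := he
    have hdvd := (PySem.Int.mod_eq_zero_iff_dvd n e).mp hmod
    obtain ⟨h1, h2, h3, h4, -⟩ := pair_big n e hn he2 hen hdvd hgt
    unfold smallSet
    simp only [Finset.mem_coe, Finset.mem_filter, Finset.mem_Ico]
    exact ⟨⟨h1, h2⟩, h3, (PySem.Int.mod_eq_zero_iff_dvd n _).mpr h4⟩
  · intro e he
    unfold smallSet at he
    simp only [Finset.mem_coe, Finset.mem_filter, Finset.mem_Ico] at he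
    obtain ⟨⟨he2, -⟩, hlt, hmod⟩ := he
    exact (pair_small n e hn he2 ((PySem.Int.mod_eq_zero_iff_dvd n e).mp hmod) hlt).2.2.2.2
  · intro e he
    unfold bigSet at he
    simp only [Finset.mem_coe, Finset.mem_filter, Finset.mem_Ico] at he
    obtain ⟨⟨he2, hen⟩, hgt, hmod⟩ := he
    exact (pair_big n e hn he2 hen ((PySem.Int.mod_eq_zero_iff_dvd n e).mp hmod) hgt).2.2.2.2

-- the proper divisors split by trichotomy of e*e against n
lemma count_split (n : Int) (_hn : 2 ≤ n) :
    ((Finset.Ico (2:ℤ) n).filter (fun e => PySem.Int.mod n e = 0)).card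
      = (smallSet n 2).card + (sqSet n).card + (bigSet n).card := by
  set D := (Finset.Ico (2:ℤ) n).filter (fun e => PySem.Int.mod n e = 0) with hD
  have h1 := Finset.card_filter_add_card_filter_not (s := D) (fun e => e * e < n)
  have h2 := Finset.card_filter_add_card_filter_not
    (s := D.filter (fun e => ¬ e * e < n)) (fun e => e * e = n)
  have hsm : D.filter (fun e => e * e < n) = smallSet n 2 := by
    rw [hD, Finset.filter_filter]
    unfold smallSet
    exact Finset.filter_congr (fun e _ => by tauto)
  have hsq : (D.filter (fun e => ¬ e * e < n)).filter (fun e => e * e = n) = sqSet n := by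
    rw [hD, Finset.filter_filter, Finset.filter_filter]
    unfold sqSet
    refine Finset.filter_congr (fun e he => ?_)
    rw [Finset.mem_Ico] at he
    constructor
    · tauto
    · intro heq
      refine ⟨(PySem.Int.mod_eq_zero_iff_dvd n e).mpr ⟨e, heq.symm⟩, by omega, heq⟩
  have hbg : ((D.filter (fun e => ¬ e * e < n)).filter (fun e => ¬ e * e = n)) = bigSet n := by
    rw [hD, Finset.filter_filter, Finset.filter_filter]
    unfold bigSet
    refine Finset.filter_congr (fun e he => ?_)
    constructor
    · rintro ⟨hm, hge, hne⟩
      exact ⟨by omega, hm⟩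
    · rintro ⟨hgt, hm⟩
      exact ⟨hm, by omega, by omega⟩
  rw [hsm] at h1
  rw [hsq, hbg] at h2
  omega

-- the square bonus equals the count of square-root divisors
lemma sqSet_card (n : Int) (_hn : 2 ≤ n) : ((sqSet n).card : Int) = sqTerm n 2 := by
  unfold sqTerm
  by_cases hne : ((Finset.Ico (2:ℤ) (n + 1)).filter (fun e => e * e = n)).Nonempty
  · rw [if_pos hne]
    obtain ⟨s, hs⟩ := hne
    simp only [Finset.mem_filter, Finset.mem_Ico] at hs
    obtain ⟨⟨hs2, -⟩, hsq⟩ := hs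
    have hsn : s < n := by nlinarith
    have hone : sqSet n = {s} := by
      unfold sqSet
      ext f
      simp only [Finset.mem_filter, Finset.mem_Ico, Finset.mem_singleton]
      constructor
      · rintro ⟨⟨hf2, -⟩, hfq⟩
        have hz : (f - s) * (f + s) = 0 := by nlinarith
        rcases mul_eq_zero.mp hz with h | h <;> omega
      · intro h
        rw [h]
        exact ⟨⟨hs2, hsn⟩, hsq⟩
    rw [hone, Finset.card_singleton]
    norm_num
  · rw [if_neg hne]
    have hempty : sqSet n = ∅ := by
      unfold sqSet
      rw [Finset.filter_eq_empty_iff]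
      intro e he heq
      rw [Finset.mem_Ico] at he
      exact hne ⟨e, by
        simp only [Finset.mem_filter, Finset.mem_Ico]
        exact ⟨⟨he.1, by omega⟩, heq⟩⟩
    rw [hempty, Finset.card_empty]
    norm_num

-- the proper divisors of n, counted against Nat.divisors: their number plus 2 is τ(n)
lemma cardD_add_two (n : Int) (hn : 2 ≤ n) :
    ((Finset.Ico (2:ℤ) n).filter (fun e => PySem.Int.mod n e = 0)).card + 2
      = n.toNat.divisors.card := by
  set N := n.toNat with hN
  have hN2 : 2 ≤ N := by omega
  have hcast : (N : Int) = n := Int.toNat_of_nonneg (by omega)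
  have hbij : ((Finset.Ico (2:ℤ) n).filter (fun e => PySem.Int.mod n e = 0)).card
      = (N.divisors.filter (fun k => ¬ (k = 1 ∨ k = N))).card := by
    refine Finset.card_nbij' (i := fun (e : Int) => e.toNat) (j := fun (k : Nat) => (k : Int)) ?_ ?_ ?_ ?_
    · intro e he
      simp only [Finset.mem_coe, Finset.mem_filter, Finset.mem_Ico] at he
      obtain ⟨⟨he2, hen⟩, hmod⟩ := he
      have hdvd : e ∣ n := (PySem.Int.mod_eq_zero_iff_dvd n e).mp hmod
      have hek : ((e.toNat : Nat) : Int) = e := Int.toNat_of_nonneg (by omega)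
      have hkdvd : e.toNat ∣ N := by
        rw [← Int.natCast_dvd_natCast, hek, hcast]
        exact hdvd
      simp only [Finset.mem_coe, Finset.mem_filter, Nat.mem_divisors]
      refine ⟨⟨hkdvd, by omega⟩, by omega⟩
    · intro k hk
      simp only [Finset.mem_coe, Finset.mem_filter, Nat.mem_divisors] at hk
      obtain ⟨⟨hdvd, -⟩, hne⟩ := hk
      have hk1 : 1 ≤ k := Nat.pos_of_dvd_of_pos hdvd (by omega)
      have hkN : k ≤ N := Nat.le_of_dvd (by omega) hdvd
      have hidvd : (k : Int) ∣ n := by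
        rw [← hcast]
        exact Int.natCast_dvd_natCast.mpr hdvd
      simp only [Finset.mem_coe, Finset.mem_filter, Finset.mem_Ico]
      exact ⟨⟨by omega, by omega⟩, (PySem.Int.mod_eq_zero_iff_dvd n _).mpr hidvd⟩
    · intro e he
      simp only [Finset.mem_coe, Finset.mem_filter, Finset.mem_Ico] at he
      exact Int.toNat_of_nonneg (by omega)
    · intro k _
      exact Int.toNat_natCast k
  have hT : N.divisors.filter (fun k => ¬ (k = 1 ∨ k = N)) = (N.divisors.erase N).erase 1 := by
    ext k
    simp only [Finset.mem_filter, Finset.mem_erase, Nat.mem_divisors]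
    tauto
  have hNmem : N ∈ N.divisors := Nat.mem_divisors_self N (by omega)
  have h1mem : (1 : Nat) ∈ N.divisors.erase N := by
    rw [Finset.mem_erase]
    exact ⟨by omega, Nat.one_mem_divisors.mpr (by omega)⟩
  have hc1 := Finset.card_erase_add_one h1mem
  have hc2 := Finset.card_erase_add_one hNmem
  rw [hbij, hT]
  omega

-- Source B's inner loop extracts the full power of d from m
lemma pyExtract_spec (d : Nat) (hd : 2 ≤ d) : ∀ m, 0 < m →
    m = d ^ (pyExtract d m).1 * (pyExtract d m).2
      ∧ ¬ d ∣ (pyExtract d m).2 ∧ 0 < (pyExtract d m).2 := by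
  intro m
  induction m using Nat.strong_induction_on with
  | _ m ih =>
    intro hm
    rw [pyExtract]
    by_cases h : m % d = 0 ∧ 2 ≤ d ∧ 0 < m
    · rw [dif_pos h]
      have hdvd : d ∣ m := Nat.dvd_of_mod_eq_zero h.1
      have hlt : m / d < m := Nat.div_lt_self hm (by omega)
      have hpos : 0 < m / d := Nat.div_pos (Nat.le_of_dvd hm hdvd) (by omega)
      obtain ⟨h1, h2, h3⟩ := ih (m / d) hlt hpos
      refine ⟨?_, h2, h3⟩
      have hmd : d * (m / d) = m := Nat.mul_div_cancel' hdvd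
      calc m = d * (m / d) := hmd.symm
        _ = d * (d ^ (pyExtract d (m / d)).1 * (pyExtract d (m / d)).2) := by rw [← h1]
        _ = d ^ ((pyExtract d (m / d)).1 + 1) * (pyExtract d (m / d)).2 := by ring
    · rw [dif_neg h]
      have hmod : m % d ≠ 0 := fun hc => h ⟨hc, hd, hm⟩
      refine ⟨by simp, ?_, hm⟩
      intro hdvd
      exact hmod (Nat.mod_eq_zero_of_dvd hdvd)

-- a number ≥ 2 all of whose prime factors are ≥ itself is prime
lemma prime_of_min_ge (d : Nat) (hd : 2 ≤ d) (hmin : ∀ p, p.Prime → p ∣ d → d ≤ p) :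
    d.Prime := by
  have hp := Nat.minFac_prime (show d ≠ 1 by omega)
  have h1 := Nat.minFac_dvd d
  have h2 : d.minFac ≤ d := Nat.minFac_le (by omega)
  have h3 := hmin _ hp h1
  have h4 : d.minFac = d := by omega
  rwa [← h4]

-- Source B's outer loop multiplies cnt by the divisor count of m when every prime factor of m is ≥ d
lemma facLoop_eq (d m cnt : Nat) :
    2 ≤ d → 0 < m → (∀ p, p.Prime → p ∣ m → d ≤ p) →
    facLoop d m cnt = cnt * m.divisors.card := by
  induction d, m, cnt using facLoop.induct with
  | case1 d m cnt hdd hmod ih =>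
    intro hd hm hfac
    obtain ⟨heq, hnd, hpos⟩ := pyExtract_spec d hd m hm
    have hdvd : d ∣ m := Nat.dvd_of_mod_eq_zero hmod
    have hdprime : d.Prime := prime_of_min_ge d hd (fun p pp pd => hfac p pp (pd.trans hdvd))
    have hm'dvd : (pyExtract d m).2 ∣ m := by
      refine ⟨d ^ (pyExtract d m).1, ?_⟩
      conv_lhs => rw [heq]
      ring
    have hfac' : ∀ p, p.Prime → p ∣ (pyExtract d m).2 → d + 1 ≤ p := by
      intro p pp pd
      have hge : d ≤ p := hfac p pp (pd.trans hm'dvd)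
      rcases (by omega : p = d ∨ d + 1 ≤ p) with h | h
      · exact absurd (h ▸ pd) hnd
      · exact h
    have hcop : Nat.Coprime (d ^ (pyExtract d m).1) (pyExtract d m).2 :=
      Nat.Coprime.pow_left _ ((Nat.Prime.coprime_iff_not_dvd hdprime).mpr hnd)
    have hpow : (d ^ (pyExtract d m).1).divisors.card = (pyExtract d m).1 + 1 := by
      rw [Nat.divisors_prime_pow hdprime, Finset.card_map, Finset.card_range]
    have hτ : m.divisors.card = ((pyExtract d m).1 + 1) * (pyExtract d m).2.divisors.card := by
      conv_lhs => rw [heq]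
      rw [Nat.Coprime.card_divisors_mul hcop, hpow]
    rw [facLoop, if_pos hdd, if_pos hmod, ih (by omega) hpos hfac', hτ]
    ring
  | case2 d m cnt hdd hmod ih =>
    intro hd hm hfac
    have hfac' : ∀ p, p.Prime → p ∣ m → d + 1 ≤ p := by
      intro p pp pd
      have hge : d ≤ p := hfac p pp pd
      rcases (by omega : p = d ∨ d + 1 ≤ p) with h | h
      · exact absurd (Nat.mod_eq_zero_of_dvd (h ▸ pd)) hmod
      · exact h
    rw [facLoop, if_pos hdd, if_neg hmod]
    exact ih (by omega) hm hfac'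
  | case3 d m cnt hdd hm1 =>
    intro hd hm hfac
    have hprime : m.Prime := by
      by_contra hnp
      have hsq := Nat.minFac_sq_le_self (by omega) hnp
      have hge := hfac _ (Nat.minFac_prime (by omega : m ≠ 1)) (Nat.minFac_dvd m)
      rw [pow_two] at hsq
      have : d * d ≤ m.minFac * m.minFac := Nat.mul_le_mul hge hge
      omega
    have hτ : m.divisors.card = 2 := by
      rw [Nat.Prime.divisors hprime,
          Finset.card_insert_of_notMem (by simp; omega), Finset.card_singleton]
    rw [facLoop, if_neg hdd, if_pos hm1, hτ]
  | case4 d m cnt hdd hm1 =>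
    intro hd hm hfac
    have hm' : m = 1 := by omega
    subst hm'
    rw [facLoop, if_neg hdd, if_neg hm1, Nat.divisors_one, Finset.card_singleton, mul_one]

-- ===== VERDICT (by name: the statement is the Claim_ definition above) =====
theorem countdel_spec : Claim_equal_countdel := by
  intro n _
  unfold Spec_countdel
  rw [countdel, loop_eq n 2 0 le_rfl]
  by_cases hn2 : n < 2
  · have hB : countdel_alt n = 0 := by rw [countdel_alt, if_pos hn2]
    have hsq : sqTerm n 2 = 0 := by
      unfold sqTerm
      rw [if_neg]
      rintro ⟨e, he⟩
      simp only [Finset.mem_filter, Finset.mem_Ico] at he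
      omega
    rw [hB, smallSet_exit n 2 le_rfl (by omega), hsq]
    simp
  · have hn : 2 ≤ n := by omega
    have h1 := count_split n hn
    have h2 := card_small_eq_big n hn
    have h3 := sqSet_card n hn
    have h4 := cardD_add_two n hn
    have h5 : facLoop 2 n.toNat 1 = n.toNat.divisors.card := by
      rw [facLoop_eq 2 n.toNat 1 le_rfl (by omega) (fun p pp _ => pp.two_le)]
      ring
    rw [countdel_alt, if_neg (by omega : ¬ n < 2), h5]
    rw [← h3]
    omega
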